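-- pv_equiv track=rewrite | github.com/EliasAroni2000/automatas | Aroni-tp1-v2.py | tokenOperadoProducto
-- ===== SOURCE A (Python) =====
-- estado_final = "estado final"
--
-- estadoNoFinal = "estado no aceptado"
--
-- estadoTrampa = "estado trampa"
--
-- def tokenOperadoProducto(lexema):
--     estado = 0
--     estadoFinal = [1]
--     caracter = {0:{'*':1},1:{}}
--     for c in lexema:
--         if c in caracter[estado]:
--             estado = caracter[estado][c]
--         else:
--             estado = -1
--             break
--     if estado == -1:
--         return estadoTrampa
--     if estado in estadoFinal:
--         return estado_final
--     else:
--         return estadoNoFinal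
-- ===== SOURCE B (Python) =====
-- def tokenOperadoProducto(lexema):
--     if lexema == '*':
--         return "estado final"
--     if lexema == '':
--         return "estado no aceptado"
--     return "estado trampa"
-- ===== Notes on version B (the rewrite author's own statement) =====
-- stated objective: simpler
-- what changed: Replaced the character-by-character DFA transition loop (state dict + trap sentinel) with a closed-form decision: '*' is final, '' is the only other non-trap state, everything else is the trap.
import Mathlib
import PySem

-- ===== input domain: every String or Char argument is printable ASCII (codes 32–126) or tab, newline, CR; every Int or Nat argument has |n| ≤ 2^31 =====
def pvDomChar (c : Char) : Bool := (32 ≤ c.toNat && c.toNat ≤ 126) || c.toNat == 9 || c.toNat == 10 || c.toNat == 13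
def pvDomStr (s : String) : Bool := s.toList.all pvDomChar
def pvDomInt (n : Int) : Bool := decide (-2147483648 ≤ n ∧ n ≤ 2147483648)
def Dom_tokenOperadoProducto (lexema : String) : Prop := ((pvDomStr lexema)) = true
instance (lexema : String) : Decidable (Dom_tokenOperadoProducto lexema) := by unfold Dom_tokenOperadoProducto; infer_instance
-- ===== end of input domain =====

-- B replaces A's DFA transition loop by a closed-form comparison of the whole string; objective: simpler.

-- ===== PORT A =====
-- the transition table caracter = {0:{'*':1},1:{}}
def pvCaracterA : PySem.Dict Int (PySem.Dict Char Int) :=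
  ((PySem.Dict.empty.insert 0 (PySem.Dict.empty.insert '*' 1)).insert 1 PySem.Dict.empty)

-- the for-loop with break: returns the final value of 'estado'
def pvLoopA : Int → List Char → Int
  | estado, [] => estado
  | estado, c :: cs =>
    -- 'caracter[estado]' cannot KeyError: estado is always a key of caracter; getD is exact here
    match (pvCaracterA.getD estado PySem.Dict.empty).get? c with
    | some v => pvLoopA v cs
    | none => -1      -- estado = -1; break

def tokenOperadoProducto (lexema : String) : String :=
  let estado := pvLoopA 0 lexema.toList
  if estado = -1 then "estado trampa"
  else if [(1 : Int)].contains estado then "estado final"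
  else "estado no aceptado"

-- ===== PORT B =====
def tokenOperadoProducto_alt (lexema : String) : String :=
  if lexema = "*" then "estado final"
  else if lexema = "" then "estado no aceptado"
  else "estado trampa"

-- ===== PRECONDITION & SPEC =====
def Spec_tokenOperadoProducto (lexema : String) (out : String) : Prop := out = tokenOperadoProducto_alt lexema
instance (lexema : String) (out : String) : Decidable (Spec_tokenOperadoProducto lexema out) := by unfold Spec_tokenOperadoProducto; infer_instance

-- ===== CLAIM (what is proved, stated in full; the proofs are below) =====
def Claim_equal_tokenOperadoProducto : Prop := ∀ (lexema : String), Dom_tokenOperadoProducto lexema → Spec_tokenOperadoProducto lexema (tokenOperadoProducto lexema)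

-- ===== LEMMAS AND PROOFS =====

-- Lookup in the literal char dict {'*':1}.
theorem pvStarDict_get? (c : Char) :
    (PySem.Dict.empty.insert '*' (1:Int)).get? c = if '*' = c then some 1 else none := by
  simp [PySem.Dict.insert, PySem.Dict.empty, PySem.Dict.get?]

-- The loop from state 1 rejects any remaining input (state 1 has no transitions).
theorem pvLoopA_one (cs : List Char) : pvLoopA 1 cs = if cs = [] then 1 else -1 := by
  cases cs with
  | nil => simp [pvLoopA]
  | cons c cs =>
    have : (pvCaracterA.getD 1 PySem.Dict.empty).get? c = none := by
      simp [pvCaracterA, PySem.Dict.getD, PySem.Dict.insert,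
        PySem.Dict.empty, PySem.Dict.get?]
    simp [pvLoopA, this]

-- Characterisation of A's loop from the start state.
theorem pvLoopA_zero (l : List Char) :
    pvLoopA 0 l = if l = [] then 0 else if l = ['*'] then 1 else -1 := by
  cases l with
  | nil => simp [pvLoopA]
  | cons c cs =>
    have hd : (pvCaracterA.getD 0 PySem.Dict.empty).get? c
        = if '*' = c then some 1 else none := by
      have : pvCaracterA.getD 0 PySem.Dict.empty = PySem.Dict.empty.insert '*' (1:Int) := by
        rfl
      rw [this, pvStarDict_get?]
    by_cases hc : '*' = c
    · subst hc
      rw [show pvLoopA 0 ('*' :: cs) = pvLoopA 1 cs by simp [pvLoopA, hd]]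
      rw [pvLoopA_one]
      cases cs <;> simp
    · rw [show pvLoopA 0 (c :: cs) = -1 by simp [pvLoopA, hd, hc]]
      simp
      exact fun h => absurd h.symm hc

-- ===== VERDICT (by name: the statement is the Claim_ definition above) =====
theorem tokenOperadoProducto_spec : Claim_equal_tokenOperadoProducto := by
  intro lexema _
  unfold Spec_tokenOperadoProducto tokenOperadoProducto tokenOperadoProducto_alt
  rw [pvLoopA_zero]
  have hs : lexema = "" ↔ lexema.toList = [] := by
    constructor <;> intro h
    · simp [h]
    · exact String.ext (by simpa using h)
  have hstar : lexema = "*" ↔ lexema.toList = ['*'] := by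
    constructor <;> intro h
    · simp [h]
    · exact String.ext (by simpa using h)
  by_cases h0 : lexema.toList = []
  · simp [hs.mpr h0]
  · by_cases h1 : lexema.toList = ['*']
    · simp [hstar.mpr h1]
    · simp only [h0, h1, if_false, if_true]
      rw [if_neg (fun h => h1 (hstar.mp h)), if_neg (fun h => h0 (hs.mp h))]
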